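-- pv_equiv track=rewrite | github.com/Seok93/algorithm-study | sparta_algorithm_lecture/week_05/practice/01_catch_me.py | catch_me
-- ===== SOURCE A (Python) =====
-- from collections import deque
--
-- MAX_LOCATION = 200000
--
-- def catch_me(cony_loc, brown_loc):
--     queue = deque()
--     queue.append([cony_loc, brown_loc, 0, 0])
--
--     while queue:
--         cony_loc, brown_loc, incre_loc, timer = queue.popleft()
--         if cony_loc > MAX_LOCATION:
--             continue
--         elif cony_loc == brown_loc:
--             break
--
--         # cony 위치 변경
--         incre_loc += 1
--         cony_loc += incre_loc
--
--         # 케이스 증가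
--         timer += 1
--
--         # 브라운 위치 케이스별 실행
--         new_brown_loc = brown_loc - 1
--         if new_brown_loc >= 0:
--             queue.append([cony_loc, new_brown_loc, incre_loc, timer])
--
--         new_brown_loc = brown_loc + 1
--         if new_brown_loc <= MAX_LOCATION:
--             queue.append([cony_loc, new_brown_loc, incre_loc, timer])
--
--         new_brown_loc = brown_loc * 2
--         if new_brown_loc <= MAX_LOCATION:
--             queue.append([cony_loc, new_brown_loc, incre_loc, timer])
--
--     return timer
-- ===== SOURCE B (Python) =====
-- MAX_LOCATION = 200000
--
-- def catch_me(cony_loc, brown_loc):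
--     # Level-by-level BFS: cony's position is deterministic per step, so only the
--     # SET of brown positions reachable at each time step needs to be tracked.
--     c, t = cony_loc, 0
--     reach = {brown_loc}
--     while c <= MAX_LOCATION:
--         if c in reach:
--             return t
--         nxt = set()
--         for b in reach:
--             if b - 1 >= 0:
--                 nxt.add(b - 1)
--             if b + 1 <= MAX_LOCATION:
--                 nxt.add(b + 1)
--             if 2 * b <= MAX_LOCATION:
--                 nxt.add(2 * b)
--         reach = nxt
--         t += 1
--         c += t
--     return t
-- ===== Notes on version B (the rewrite author's own statement) =====
-- stated objective: faster
-- what changed: Replaced the unpruned breadth-first queue (which re-enqueues every duplicate state, 3^t states at depth t) by a level-by-level search that keeps only the SET of brown positions reachable at each time step, exploiting that cony's position is a deterministic function of time.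
-- outside the precondition, e.g. on catch_me(-3, 2): A returns 2, B returns 2; on catch_me(300000, -5): A returns 0, B returns 0
import Mathlib
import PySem

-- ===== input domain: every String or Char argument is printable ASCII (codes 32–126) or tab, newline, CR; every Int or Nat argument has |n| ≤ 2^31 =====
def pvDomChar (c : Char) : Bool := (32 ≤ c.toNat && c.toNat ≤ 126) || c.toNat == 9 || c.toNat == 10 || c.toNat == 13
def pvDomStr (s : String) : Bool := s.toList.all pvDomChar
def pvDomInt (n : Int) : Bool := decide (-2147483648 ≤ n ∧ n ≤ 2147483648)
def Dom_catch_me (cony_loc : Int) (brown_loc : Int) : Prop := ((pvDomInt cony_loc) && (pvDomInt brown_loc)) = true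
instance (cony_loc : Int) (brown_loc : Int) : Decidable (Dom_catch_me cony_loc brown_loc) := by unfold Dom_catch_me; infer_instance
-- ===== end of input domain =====

-- B replaces A's unpruned exponential BFS queue (3^t states at depth t) by a level-by-level
-- search tracking only the SET of brown positions reachable at each time step (faster).

def MAX_LOCATION : Int := 200000

-- ===== PORT A =====
-- A's while-loop over the deque; states are [cony_loc, brown_loc, incre_loc, timer].
-- The fuel argument only totalizes the loop (proved sufficient on Pre_); each iteration
-- is a literal transcription of one pass of A's while-body.
def aLoop : Nat → List (Int × Int × Int × Int) → Int → Int
  | 0, _, timer => timer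
  | _ + 1, [], timer => timer
  | fuel + 1, (cony_loc, brown_loc, incre_loc, timer) :: rest, _ =>
    if MAX_LOCATION < cony_loc then aLoop fuel rest timer
    else if cony_loc = brown_loc then timer
    else
      let incre_loc' := incre_loc + 1
      let cony_loc' := cony_loc + incre_loc'
      let timer' := timer + 1
      let q1 := if 0 ≤ brown_loc - 1 then rest ++ [(cony_loc', brown_loc - 1, incre_loc', timer')] else rest
      let q2 := if brown_loc + 1 ≤ MAX_LOCATION then q1 ++ [(cony_loc', brown_loc + 1, incre_loc', timer')] else q1
      let q3 := if brown_loc * 2 ≤ MAX_LOCATION then q2 ++ [(cony_loc', brown_loc * 2, incre_loc', timer')] else q2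
      aLoop fuel q3 timer'

def catch_me (cony_loc : Int) (brown_loc : Int) : Int :=
  aLoop (4 ^ 300000) [(cony_loc, brown_loc, 0, 0)] 0

-- ===== PORT B =====
-- one level: the set of brown positions reachable in one move from `reach`
def bStep (reach : PySem.Set Int) : PySem.Set Int :=
  reach.foldl (fun nxt b =>
    let nxt := if 0 ≤ b - 1 then PySem.Set.add nxt (b - 1) else nxt
    let nxt := if b + 1 ≤ MAX_LOCATION then PySem.Set.add nxt (b + 1) else nxt
    if 2 * b ≤ MAX_LOCATION then PySem.Set.add nxt (2 * b) else nxt) PySem.Set.empty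

-- B's while-loop; the fuel only totalizes it (on Pre_ the loop exits long before 300000 steps).
def bLoop : Nat → Int → Int → PySem.Set Int → Int
  | 0, _, t, _ => t
  | fuel + 1, c, t, reach =>
    if c ≤ MAX_LOCATION then
      if PySem.Set.contains reach c then t
      else bLoop fuel (c + (t + 1)) (t + 1) (bStep reach)
    else t

def catch_me_alt (cony_loc : Int) (brown_loc : Int) : Int :=
  bLoop 300000 cony_loc 0 (PySem.Set.ofList [brown_loc])

-- ===== PRECONDITION & SPEC =====
-- Pre_ restricts to nonnegative locations (the contest's natural domain). Outside it both
-- implementations still agree in principle (see the cited examples), but A's unpruned BFS is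
-- astronomically slow on almost all such inputs, and for negative brown_loc B's level sets
-- grow without bound; the claim is therefore stated on the natural domain only.
def Pre_catch_me (cony_loc : Int) (brown_loc : Int) : Prop :=
  0 ≤ cony_loc ∧ 0 ≤ brown_loc
instance (cony_loc : Int) (brown_loc : Int) : Decidable (Pre_catch_me cony_loc brown_loc) := by
  unfold Pre_catch_me; infer_instance
def pvWitness_catch_me : Int × Int := (3, 5)

def Spec_catch_me (cony_loc : Int) (brown_loc : Int) (out : Int) : Prop := out = catch_me_alt cony_loc brown_loc
instance (cony_loc : Int) (brown_loc : Int) (out : Int) : Decidable (Spec_catch_me cony_loc brown_loc out) := by unfold Spec_catch_me; infer_instance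

-- ===== CLAIM (what is proved, stated in full; the proofs are below) =====
def Claim_equal_catch_me : Prop := ∀ (cony_loc : Int) (brown_loc : Int), Dom_catch_me cony_loc brown_loc → Pre_catch_me cony_loc brown_loc → Spec_catch_me cony_loc brown_loc (catch_me cony_loc brown_loc)

-- ===== LEMMAS AND PROOFS =====

-- the brown values reachable in one move from b, as A generates them
def childVals (b : Int) : List Int :=
  (if 0 ≤ b - 1 then [b - 1] else []) ++
  (if b + 1 ≤ MAX_LOCATION then [b + 1] else []) ++
  (if b * 2 ≤ MAX_LOCATION then [b * 2] else [])

-- a whole BFS level of A's queue, at cony position c and time t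
def lvl (c t : Int) (bs : List Int) : List (Int × Int × Int × Int) :=
  bs.map (fun b => (c, b, t, t))

lemma aLoop_nil (f : Nat) (x : Int) : aLoop f [] x = x := by
  cases f <;> rfl

lemma aLoop_step (f : Nat) (c b t x : Int) (rest : List (Int × Int × Int × Int))
    (hle : c ≤ MAX_LOCATION) (hne : c ≠ b) :
    aLoop (f + 1) ((c, b, t, t) :: rest) x
      = aLoop f (rest ++ lvl (c + (t + 1)) (t + 1) (childVals b)) (t + 1) := by
  show (if MAX_LOCATION < c then aLoop f rest t else if c = b then t else _) = _
  rw [if_neg (not_lt.mpr hle), if_neg hne]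
  unfold lvl childVals
  split_ifs <;> simp [List.append_assoc]

lemma aLoop_level (c t : Int) (hle : c ≤ MAX_LOCATION) :
    ∀ (bs : List Int) (f : Nat) (acc : List (Int × Int × Int × Int)) (x : Int),
    (∀ b ∈ bs, b ≠ c) →
    aLoop (f + bs.length) (lvl c t bs ++ acc) x
      = aLoop f (acc ++ lvl (c + (t + 1)) (t + 1) (bs.flatMap childVals))
          (if bs.isEmpty then x else t + 1) := by
  intro bs
  induction bs with
  | nil => intro f acc x _; simp [lvl]
  | cons b bs ih =>
    intro f acc x hne
    have hstep := aLoop_step (f + bs.length) c b t x (lvl c t bs ++ acc) hle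
      (Ne.symm (hne b List.mem_cons_self))
    have hcons : lvl c t (b :: bs) ++ acc = (c, b, t, t) :: (lvl c t bs ++ acc) := by
      simp [lvl]
    have hlen : f + (b :: bs).length = (f + bs.length) + 1 := by simp [List.length_cons]; omega
    rw [hcons, hlen, hstep, List.append_assoc]
    rw [ih f (acc ++ lvl (c + (t + 1)) (t + 1) (childVals b)) (t + 1)
      (fun b' hb' => hne b' (List.mem_cons_of_mem b hb'))]
    simp [lvl, List.flatMap_cons, List.append_assoc]

lemma aLoop_skip (c t : Int) (hgt : MAX_LOCATION < c) :
    ∀ (bs : List Int) (f : Nat) (acc : List (Int × Int × Int × Int)) (x : Int),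
    aLoop (f + bs.length) (lvl c t bs ++ acc) x
      = aLoop f acc (if bs.isEmpty then x else t) := by
  intro bs
  induction bs with
  | nil => intro f acc x; simp [lvl]
  | cons b bs ih =>
    intro f acc x
    have hcons : lvl c t (b :: bs) ++ acc = (c, b, t, t) :: (lvl c t bs ++ acc) := by
      simp [lvl]
    have hlen : f + (b :: bs).length = (f + bs.length) + 1 := by simp [List.length_cons]; omega
    rw [hcons, hlen]
    show (if MAX_LOCATION < c then aLoop (f + bs.length) (lvl c t bs ++ acc) t else _) = _
    rw [if_pos hgt, ih f acc t]
    simp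

lemma aLoop_hit (c t : Int) (hle : c ≤ MAX_LOCATION) :
    ∀ (bs : List Int) (f : Nat) (acc : List (Int × Int × Int × Int)) (x : Int),
    c ∈ bs → bs.length ≤ f →
    aLoop f (lvl c t bs ++ acc) x = t := by
  intro bs
  induction bs with
  | nil => intro f acc x h; exact absurd h (List.not_mem_nil)
  | cons b bs ih =>
    intro f acc x hmem hf
    obtain ⟨f, rfl⟩ : ∃ f', f = f' + 1 := ⟨f - 1, by simp at hf ⊢; omega⟩
    have hcons : lvl c t (b :: bs) ++ acc = (c, b, t, t) :: (lvl c t bs ++ acc) := by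
      simp [lvl]
    rw [hcons]
    by_cases hcb : c = b
    · show (if MAX_LOCATION < c then _ else if c = b then t else _) = t
      rw [if_neg (not_lt.mpr hle), if_pos hcb]
    · have hmem' : c ∈ bs := by
        rcases List.mem_cons.mp hmem with h | h
        · exact absurd h hcb
        · exact h
      rw [aLoop_step f c b t x (lvl c t bs ++ acc) hle hcb, List.append_assoc]
      exact ih f (acc ++ lvl (c + (t + 1)) (t + 1) (childVals b)) (t + 1) hmem'
        (by simp at hf ⊢; omega)

lemma mem_bStep_aux (y : Int) : ∀ (l : List Int) (acc : PySem.Set Int),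
    y ∈ l.foldl (fun nxt b =>
      let nxt := if 0 ≤ b - 1 then PySem.Set.add nxt (b - 1) else nxt
      let nxt := if b + 1 ≤ MAX_LOCATION then PySem.Set.add nxt (b + 1) else nxt
      if 2 * b ≤ MAX_LOCATION then PySem.Set.add nxt (2 * b) else nxt) acc
      ↔ y ∈ acc ∨ ∃ b ∈ l, y ∈ childVals b := by
  intro l
  induction l with
  | nil => intro acc; simp
  | cons b l ih =>
    intro acc
    rw [List.foldl_cons, ih]
    have hstep : ∀ (acc : PySem.Set Int),
        (y ∈ (let nxt := if 0 ≤ b - 1 then PySem.Set.add acc (b - 1) else acc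
              let nxt := if b + 1 ≤ MAX_LOCATION then PySem.Set.add nxt (b + 1) else nxt
              if 2 * b ≤ MAX_LOCATION then PySem.Set.add nxt (2 * b) else nxt))
          ↔ y ∈ acc ∨ y ∈ childVals b := by
      intro acc
      unfold childVals
      have h2 : b * 2 = 2 * b := mul_comm b 2
      simp only [h2]
      split_ifs <;> simp [PySem.Set.mem_add] <;> tauto
    rw [hstep]
    simp only [List.mem_cons]
    constructor
    · rintro ((h | h) | ⟨b', hb', hy⟩)
      · exact Or.inl h
      · exact Or.inr ⟨b, Or.inl rfl, h⟩
      · exact Or.inr ⟨b', Or.inr hb', hy⟩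
    · rintro (h | ⟨b', (rfl | hb'), hy⟩)
      · exact Or.inl (Or.inl h)
      · exact Or.inl (Or.inr hy)
      · exact Or.inr ⟨b', hb', hy⟩

lemma mem_bStep (y : Int) (s : PySem.Set Int) :
    y ∈ bStep s ↔ ∃ b ∈ s, y ∈ childVals b := by
  unfold bStep
  rw [mem_bStep_aux]
  simp [PySem.Set.empty]

lemma childVals_ne_nil (b : Int) : childVals b ≠ [] := by
  unfold childVals MAX_LOCATION
  split_ifs <;> simp_all
  omega

lemma length_childVals_le (b : Int) : (childVals b).length ≤ 3 := by
  unfold childVals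
  split_ifs <;> simp

lemma length_flatMap_childVals (bs : List Int) :
    (bs.flatMap childVals).length ≤ 3 * bs.length := by
  induction bs with
  | nil => simp
  | cons b bs ih =>
    simp only [List.flatMap_cons, List.length_append, List.length_cons]
    have := length_childVals_le b
    omega

lemma main (n : Nat) : ∀ (t c : Int) (bs : List Int) (reach : PySem.Set Int) (f : Nat) (x : Int),
    0 ≤ t → MAX_LOCATION < c + (n : Int) → bs ≠ [] →
    (∀ b : Int, b ∈ bs ↔ b ∈ reach) →
    bs.length * 4 ^ n ≤ f →
    aLoop f (lvl c t bs) x = bLoop n c t reach := by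
  induction n with
  | zero =>
    intro t c bs reach f x ht hc hbs hmem hf
    have hgt : MAX_LOCATION < c := by push_cast at hc; omega
    have hlen : bs.length ≤ f := by simpa using hf
    have hskip := aLoop_skip c t hgt bs (f - bs.length) [] x
    rw [Nat.sub_add_cancel hlen] at hskip
    rw [← List.append_nil (lvl c t bs), hskip, aLoop_nil]
    simp [bLoop, hbs]
  | succ n ih =>
    intro t c bs reach f x ht hc hbs hmem hf
    have hpow : 1 ≤ 4 ^ (n + 1) := Nat.one_le_pow _ _ (by norm_num)
    have hlen : bs.length ≤ f := by
      calc bs.length = bs.length * 1 := (Nat.mul_one _).symm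
        _ ≤ bs.length * 4 ^ (n + 1) := Nat.mul_le_mul_left _ hpow
        _ ≤ f := hf
    by_cases hle : c ≤ MAX_LOCATION
    · by_cases hcon : PySem.Set.contains reach c = true
      · have hcr : c ∈ reach := (PySem.Set.contains_iff reach c).mp hcon
        have hcb : c ∈ bs := (hmem c).mpr hcr
        have hbl : bLoop (n + 1) c t reach = t := by simp [bLoop, hle, hcr]
        rw [hbl, ← List.append_nil (lvl c t bs)]
        exact aLoop_hit c t hle bs f [] x hcb hlen
      · have hncr : c ∉ reach := fun h => hcon ((PySem.Set.contains_iff reach c).mpr h)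
        have hnotin : ∀ b ∈ bs, b ≠ c := by
          intro b hb heq
          exact hncr ((hmem c).mp (heq ▸ hb))
        have hlvl := aLoop_level c t hle bs (f - bs.length) [] x hnotin
        rw [Nat.sub_add_cancel hlen] at hlvl
        have hstep : aLoop f (lvl c t bs) x
            = aLoop (f - bs.length) (lvl (c + (t + 1)) (t + 1) (bs.flatMap childVals)) (t + 1) := by
          rw [← List.append_nil (lvl c t bs), hlvl]
          simp [hbs]
        have hbl : bLoop (n + 1) c t reach = bLoop n (c + (t + 1)) (t + 1) (bStep reach) := by
          simp [bLoop, hle, hncr]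
        rw [hstep, hbl]
        have hlen3 := length_flatMap_childVals bs
        apply ih (t + 1) (c + (t + 1)) (bs.flatMap childVals) (bStep reach) (f - bs.length) (t + 1)
        · omega
        · push_cast at hc ⊢; omega
        · obtain ⟨b, hb⟩ := List.exists_mem_of_ne_nil bs hbs
          obtain ⟨y, hy⟩ := List.exists_mem_of_ne_nil (childVals b) (childVals_ne_nil b)
          exact List.ne_nil_of_mem (List.mem_flatMap.mpr ⟨b, hb, hy⟩)
        · intro y
          rw [List.mem_flatMap, mem_bStep]
          exact ⟨fun ⟨b, h1, h2⟩ => ⟨b, (hmem b).mp h1, h2⟩,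
                 fun ⟨b, h1, h2⟩ => ⟨b, (hmem b).mpr h1, h2⟩⟩
        · have h1 : (bs.flatMap childVals).length * 4 ^ n ≤ 3 * bs.length * 4 ^ n :=
            Nat.mul_le_mul_right _ hlen3
          have h2 : bs.length ≤ bs.length * 4 ^ n :=
            Nat.le_mul_of_pos_right _ (Nat.pow_pos (by norm_num))
          have key : (bs.flatMap childVals).length * 4 ^ n + bs.length ≤ f := by
            calc (bs.flatMap childVals).length * 4 ^ n + bs.length
                ≤ 3 * bs.length * 4 ^ n + bs.length * 4 ^ n := Nat.add_le_add h1 h2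
              _ = bs.length * 4 ^ (n + 1) := by ring
              _ ≤ f := hf
          omega
    · have hgt : MAX_LOCATION < c := not_le.mp hle
      have hskip := aLoop_skip c t hgt bs (f - bs.length) [] x
      rw [Nat.sub_add_cancel hlen] at hskip
      rw [← List.append_nil (lvl c t bs), hskip, aLoop_nil]
      simp [bLoop, hle, hbs]

-- ===== VERDICT (by name: the statement is the Claim_ definition above) =====
theorem catch_me_spec : Claim_equal_catch_me := by
  intro cony brown _ hpre
  unfold Spec_catch_me catch_me catch_me_alt
  have h : [(cony, brown, 0, 0)] = lvl cony 0 [brown] := rfl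
  rw [h]
  refine main 300000 0 cony [brown] (PySem.Set.ofList [brown]) (4 ^ 300000) 0 le_rfl ?_ (by simp) ?_ (by norm_num)
  · unfold MAX_LOCATION
    obtain ⟨h1, _⟩ := hpre
    push_cast
    omega
  · intro b
    simp [PySem.Set.mem_ofList]
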